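-- pv_equiv track=rewrite | github.com/huntekah/aoc_2023 | aoc_12/aoc_12_2.py | get_all_possible_arrangements
-- ===== SOURCE A (Python) =====
-- from itertools import product
--
-- damaged = "#"
--
-- operational = "."
--
-- unknown = "?"
--
-- def get_all_possible_arrangements(normal: str) -> list[str]:
--     arrangement_options = []
--     for char in normal:
--         if char == unknown:
--             arrangement_options.append([operational, damaged])
--         else:
--             arrangement_options.append([char])
--     arrangements = product(*arrangement_options)
--     for arrangement in arrangements:
--         yield "".join(arrangement)
-- ===== SOURCE B (Python) =====
-- damaged = "#"
-- operational = "."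
-- unknown = "?"
--
-- def get_all_possible_arrangements(normal: str):
--     stack = [(0, "")]
--     while stack:
--         i, prefix = stack.pop()
--         if i == len(normal):
--             yield prefix
--             continue
--         char = normal[i]
--         if char == unknown:
--             stack.append((i + 1, prefix + damaged))
--             stack.append((i + 1, prefix + operational))
--         else:
--             stack.append((i + 1, prefix + char))
-- ===== Notes on version B (the rewrite author's own statement) =====
-- stated objective: alternative
-- what changed: Replaces the options-list + itertools.product pass with an explicit-stack depth-first search over (index, prefix) states that yields completed strings directly (pushing '#' then '.' so '.' comes out first).
import Mathlib
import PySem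

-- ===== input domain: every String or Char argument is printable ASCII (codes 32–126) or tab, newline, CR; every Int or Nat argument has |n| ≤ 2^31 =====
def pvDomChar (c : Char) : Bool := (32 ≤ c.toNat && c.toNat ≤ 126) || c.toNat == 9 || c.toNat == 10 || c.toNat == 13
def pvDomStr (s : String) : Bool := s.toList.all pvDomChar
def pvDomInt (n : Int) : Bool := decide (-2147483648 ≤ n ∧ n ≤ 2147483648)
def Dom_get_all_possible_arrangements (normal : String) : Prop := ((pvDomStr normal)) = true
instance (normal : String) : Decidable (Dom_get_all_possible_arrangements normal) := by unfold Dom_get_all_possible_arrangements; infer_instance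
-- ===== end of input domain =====

-- B replaces the options-list + itertools.product construction with an explicit-stack
-- depth-first search accumulating a prefix ('.' before '#' at each '?'); same cost, different decomposition.
-- Both Pythons are generators; the equivalence here is about the list of yielded strings in order.

-- ===== PORT A =====
-- itertools.product(*options) in itertools' order (strings as List Char; exact)
def pvProduct : List (List (List Char)) → List (List (List Char))
  | [] => [[]]
  | o :: rest => o.flatMap (fun x => (pvProduct rest).map (x :: ·))

-- "".join(arrangement) (strings as List Char; exact)
def pvJoin (l : List (List Char)) : List Char := l.foldl (· ++ ·) []

def get_all_possible_arrangements (normal : String) : List String :=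
  let arrangement_options : List (List (List Char)) :=
    normal.toList.map (fun char => if char = '?' then [['.'], ['#']] else [[char]])
  (pvProduct arrangement_options).map (fun arrangement => String.ofList (pvJoin arrangement))

-- ===== PORT B =====
-- explicit-stack depth-first search; the list head is the stack top (Python pushes '#' then '.',
-- so '.' is processed first)
def runB : List (List Char × List Char) → List String
  | [] => []
  | ([], prefixAcc) :: stack => String.ofList prefixAcc :: runB stack
  | (char :: rest, prefixAcc) :: stack =>
    if char = '?' then
      runB ((rest, prefixAcc ++ ['.']) :: (rest, prefixAcc ++ ['#']) :: stack)
    else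
      runB ((rest, prefixAcc ++ [char]) :: stack)
  termination_by st => (st.map (fun p => 3 ^ p.1.length)).sum
  decreasing_by
  all_goals
    simp only [List.map_cons, List.sum_cons, List.length_cons, List.length_nil,
      pow_succ, pow_zero]
    try have h3 : 0 < 3 ^ rest.length := Nat.pow_pos (by omega)
    omega
def get_all_possible_arrangements_alt (normal : String) : List String :=
  runB [(normal.toList, [])]

-- ===== PRECONDITION & SPEC =====
def Spec_get_all_possible_arrangements (normal : String) (out : List String) : Prop := out = get_all_possible_arrangements_alt normal
instance (normal : String) (out : List String) : Decidable (Spec_get_all_possible_arrangements normal out) := by unfold Spec_get_all_possible_arrangements; infer_instance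

-- ===== CLAIM (what is proved, stated in full; the proofs are below) =====
def Claim_equal_get_all_possible_arrangements : Prop := ∀ (normal : String), Dom_get_all_possible_arrangements normal → Spec_get_all_possible_arrangements normal (get_all_possible_arrangements normal)

-- ===== LEMMAS AND PROOFS =====

theorem pvJoin_foldl_shift (l : List (List Char)) : ∀ (a : List Char),
    l.foldl (· ++ ·) a = a ++ l.foldl (· ++ ·) [] := by
  induction l with
  | nil => simp
  | cons x xs ih =>
    intro a
    rw [List.foldl_cons, List.foldl_cons, List.nil_append, ih (a ++ x), ih x,
      List.append_assoc]

theorem pvJoin_cons (x : List Char) (l : List (List Char)) :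
    pvJoin (x :: l) = x ++ pvJoin l := by
  simp only [pvJoin, List.foldl_cons, List.nil_append]
  exact pvJoin_foldl_shift l x

theorem runB_cons (cs : List Char) : ∀ (pre : List Char) (stack : List (List Char × List Char)),
    runB ((cs, pre) :: stack) =
      (pvProduct (cs.map (fun char => if char = '?' then [['.'], ['#']] else [[char]]))).map
        (fun arrangement => String.ofList (pre ++ pvJoin arrangement)) ++ runB stack := by
  induction cs with
  | nil =>
    intro pre stack
    simp [runB, pvProduct, pvJoin]
  | cons c rest ih =>
    intro pre stack
    by_cases hc : c = '?'
    · rw [show runB ((c :: rest, pre) :: stack)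
            = runB ((rest, pre ++ ['.']) :: (rest, pre ++ ['#']) :: stack) by
          rw [runB]; simp [hc]]
      rw [ih (pre ++ ['.']), ih (pre ++ ['#'])]
      simp only [List.map_cons, hc, pvProduct, List.flatMap_cons,
        List.flatMap_nil, List.append_nil, List.map_append, List.map_map, if_pos]
      simp [Function.comp_def, pvJoin_cons, List.append_assoc]
    · rw [show runB ((c :: rest, pre) :: stack) = runB ((rest, pre ++ [c]) :: stack) by
          rw [runB]; simp [hc]]
      rw [ih (pre ++ [c])]
      simp only [List.map_cons, if_neg hc, pvProduct, List.flatMap_cons,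
        List.flatMap_nil, List.append_nil, List.map_map]
      simp [Function.comp_def, pvJoin_cons, List.append_assoc]

-- ===== VERDICT (by name: the statement is the Claim_ definition above) =====
theorem get_all_possible_arrangements_spec : Claim_equal_get_all_possible_arrangements := by
  intro normal _
  show get_all_possible_arrangements normal = get_all_possible_arrangements_alt normal
  unfold get_all_possible_arrangements get_all_possible_arrangements_alt
  rw [runB_cons normal.toList [] []]
  simp [runB]
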